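-- pv_equiv track=rewrite | github.com/yogan/advent-of-code | 2024/day-21-python/aoc.py | shortest_num_pad_paths
-- ===== SOURCE A (Python) =====
-- NUM_MOVES = {
--     "A": [("0", "<"), ("3", "^")],
--     "0": [("A", ">"), ("2", "^")],
--     "1": [("4", "^"), ("2", ">")],
--     "2": [("1", "<"), ("5", "^"), ("3", ">"), ("0", "v")],
--     "3": [("6", "^"), ("2", "<"), ("A", "v")],
--     "4": [("7", "^"), ("5", ">"), ("1", "v")],
--     "5": [("4", "<"), ("8", "^"), ("6", ">"), ("2", "v")],
--     "6": [("9", "^"), ("5", "<"), ("3", "v")],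
--     "7": [("8", ">"), ("4", "v")],
--     "8": [("7", "<"), ("9", ">"), ("5", "v")],
--     "9": [("8", "<"), ("6", "v")],
-- }
--
-- def shortest_num_pad_paths(src, tgt):
--     dist = {}
--     prev = {}
--     queue = []
--
--     for node in NUM_MOVES:
--         dist[node] = float("inf")
--         prev[node] = None
--         queue.append(node)
--
--     dist[src] = 0
--
--     while queue:
--         u = min(queue, key=lambda node: dist[node])
--         queue.remove(u)
--
--         for v, dir in NUM_MOVES[u]:
--             alt = dist[u] + 1
--             if alt < dist[v]:
--                 dist[v] = alt
--                 prev[v] = [(u, dir)]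
--             elif alt == dist[v]:
--                 prev[v].append((u, dir))
--
--     all_shortest_paths = []
--
--     def reconstruct_paths(v, path):
--         if v == src:
--             all_shortest_paths.append(path)
--         else:
--             for u, dir in prev[v]:
--                 reconstruct_paths(u, dir + path)
--
--     reconstruct_paths(tgt, "")
--
--     return all_shortest_paths
-- ===== SOURCE B (Python) =====
-- NUM_MOVES = {
--     "A": [("0", "<"), ("3", "^")],
--     "0": [("A", ">"), ("2", "^")],
--     "1": [("4", "^"), ("2", ">")],
--     "2": [("1", "<"), ("5", "^"), ("3", ">"), ("0", "v")],
--     "3": [("6", "^"), ("2", "<"), ("A", "v")],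
--     "4": [("7", "^"), ("5", ">"), ("1", "v")],
--     "5": [("4", "<"), ("8", "^"), ("6", ">"), ("2", "v")],
--     "6": [("9", "^"), ("5", "<"), ("3", "v")],
--     "7": [("8", ">"), ("4", "v")],
--     "8": [("7", "<"), ("9", ">"), ("5", "v")],
--     "9": [("8", "<"), ("6", "v")],
-- }
--
-- def shortest_num_pad_paths(src, tgt):
--     # BFS from src on the unit-weight pad graph (no Dijkstra min-extraction),
--     # then a forward DP over nodes in BFS order building all shortest path
--     # strings (no recursive backtracking over a prev map).
--     dist = {src: 0}
--     queue = [src]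
--     i = 0
--     while i < len(queue):
--         u = queue[i]
--         i += 1
--         for v, _ in NUM_MOVES[u]:
--             if v not in dist:
--                 dist[v] = dist[u] + 1
--                 queue.append(v)
--     paths = {src: [""]}
--     for v in queue:
--         if v != src:
--             paths[v] = [p + d
--                         for u, edges in NUM_MOVES.items()
--                         for w, d in edges
--                         if w == v and dist[u] + 1 == dist[v]
--                         for p in paths[u]]
--     return paths[tgt]
-- ===== Notes on version B (the rewrite author's own statement) =====
-- stated objective: simpler
-- what changed: Dijkstra with repeated min-extraction plus a recursive prev-map backtracking is replaced by a plain BFS on the unit-weight pad graph followed by a forward dynamic program over nodes in BFS order that builds the shortest-path strings directly.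
import Mathlib
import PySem

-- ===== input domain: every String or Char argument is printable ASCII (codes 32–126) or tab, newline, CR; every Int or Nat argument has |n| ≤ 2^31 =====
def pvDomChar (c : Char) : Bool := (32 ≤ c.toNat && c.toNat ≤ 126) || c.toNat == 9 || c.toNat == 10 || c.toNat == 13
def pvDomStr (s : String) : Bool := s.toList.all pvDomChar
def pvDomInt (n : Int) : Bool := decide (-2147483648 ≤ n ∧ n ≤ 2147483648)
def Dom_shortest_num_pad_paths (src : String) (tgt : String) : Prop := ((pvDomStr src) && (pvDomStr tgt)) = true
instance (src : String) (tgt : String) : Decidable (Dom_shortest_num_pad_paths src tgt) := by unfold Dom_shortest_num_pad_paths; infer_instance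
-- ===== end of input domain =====

-- B replaces A's Dijkstra-with-min-extraction + recursive backtracking by a plain BFS
-- (unit weights) followed by a forward DP over nodes in BFS order that builds all
-- shortest path strings directly; same return value on the pad, stated via Pre_.


-- module-level constant NUM_MOVES, shared context of both versions
def NUM_MOVES : PySem.Dict String (List (String × String)) := PySem.Dict.ofList [
  ("A", [("0", "<"), ("3", "^")]),
  ("0", [("A", ">"), ("2", "^")]),
  ("1", [("4", "^"), ("2", ">")]),
  ("2", [("1", "<"), ("5", "^"), ("3", ">"), ("0", "v")]),
  ("3", [("6", "^"), ("2", "<"), ("A", "v")]),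
  ("4", [("7", "^"), ("5", ">"), ("1", "v")]),
  ("5", [("4", "<"), ("8", "^"), ("6", ">"), ("2", "v")]),
  ("6", [("9", "^"), ("5", "<"), ("3", "v")]),
  ("7", [("8", ">"), ("4", "v")]),
  ("8", [("7", "<"), ("9", ">"), ("5", "v")]),
  ("9", [("8", "<"), ("6", "v")])]

-- ===== PORT A =====
-- float("inf") distances ported as Option Int, none = inf (exact: on this graph all
-- finite distances are small ints, and inf only ever meets ints or inf in +1/</==).
def infAdd1 : Option Int → Option Int
  | none => none
  | some d => some (d + 1)

def infLt : Option Int → Option Int → Bool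
  | some a, some b => a < b
  | some _, none => true
  | none, _ => false

def infEq : Option Int → Option Int → Bool
  | some a, some b => a == b
  | none, none => true
  | _, _ => false

-- min(queue, key=lambda node: dist[node]): first element with minimal dist
def selectMin (dist : PySem.Dict String (Option Int)) : List String → String
  | [] => ""  -- never called on an empty queue
  | x :: xs => xs.foldl (fun best n =>
      if infLt (dist.getD n none) (dist.getD best none) then n else best) x

-- body of 'for v, dir in NUM_MOVES[u]' (prev[v].append ported via getD []: within
-- Pre_ the append branch only fires when prev[v] is already a list)
def relaxStep (u : String)
    (dp : PySem.Dict String (Option Int) × PySem.Dict String (Option (List (String × String))))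
    (vd : String × String) :
    PySem.Dict String (Option Int) × PySem.Dict String (Option (List (String × String))) :=
  let alt := infAdd1 (dp.1.getD u none)
  if infLt alt (dp.1.getD vd.1 none) then
    (dp.1.insert vd.1 alt, dp.2.insert vd.1 (some [(u, vd.2)]))
  else if infEq alt (dp.1.getD vd.1 none) then
    (dp.1, dp.2.modify vd.1 none (fun o => some (o.getD [] ++ [(u, vd.2)])))
  else dp

-- 'while queue:' — fuel = initial queue length; each pass removes exactly one element
def dijkstraLoop : Nat → List String →
    PySem.Dict String (Option Int) × PySem.Dict String (Option (List (String × String))) →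
    PySem.Dict String (Option Int) × PySem.Dict String (Option (List (String × String)))
  | 0, _, dp => dp
  | fuel + 1, queue, dp =>
    if queue.isEmpty then dp
    else
      let u := selectMin dp.1 queue
      let queue' := (PySem.List.remove? queue u).getD queue  -- u ∈ queue, so remove? succeeds
      let dp' := (NUM_MOVES.getD u []).foldl (relaxStep u) dp
      dijkstraLoop fuel queue' dp'

-- recursive reconstruct_paths; fuel 16 covers every chain (dist on the pad ≤ 5,
-- and each recursive step moves to a node of strictly smaller dist)
def reconstructPaths (prev : PySem.Dict String (Option (List (String × String)))) (src : String) :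
    Nat → String → String → List String
  | 0, _, _ => []
  | fuel + 1, v, path =>
    if v == src then [path]
    else ((prev.getD v none).getD []).foldl
      (fun acc ud => acc ++ reconstructPaths prev src fuel ud.1 (ud.2 ++ path)) []

def shortest_num_pad_paths (src : String) (tgt : String) : List String :=
  let init := NUM_MOVES.keys.foldl
    (fun (s : PySem.Dict String (Option Int) × PySem.Dict String (Option (List (String × String))) × List String) n =>
      (s.1.insert n none, s.2.1.insert n none, s.2.2 ++ [n]))
    (PySem.Dict.empty, PySem.Dict.empty, [])
  let dist := init.1.insert src (some 0)
  let queue := init.2.2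
  let dp := dijkstraLoop queue.length queue (dist, init.2.1)
  reconstructPaths dp.2 src 16 tgt ""

-- ===== PORT B =====
-- BFS over the growing queue list, i the read pointer; fuel 16 ≥ max queue length (11)
def bfsLoop : Nat → List String → Nat → PySem.Dict String Int →
    List String × PySem.Dict String Int
  | 0, q, _, d => (q, d)
  | fuel + 1, q, i, d =>
    if i < q.length then
      let u := q.getD i ""  -- queue[i], i < len(queue)
      let qd := (NUM_MOVES.getD u []).foldl
        (fun (qd : List String × PySem.Dict String Int) vd =>
          if qd.2.contains vd.1 then qd
          else (qd.1 ++ [vd.1], qd.2.insert vd.1 (qd.2.getD u 0 + 1)))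
        (q, d)
      bfsLoop fuel qd.1 (i + 1) qd.2
    else (q, d)

-- the comprehension [p + d for u, edges in NUM_MOVES.items() for w, d in edges
--                    if w == v and dist[u] + 1 == dist[v] for p in paths[u]]
def pathsFor (dist : PySem.Dict String Int) (paths : PySem.Dict String (List String))
    (v : String) : List String :=
  NUM_MOVES.items.foldl (fun acc ue =>
    ue.2.foldl (fun acc2 wd =>
      if wd.1 == v && (dist.getD ue.1 0 + 1 == dist.getD v 0) then
        acc2 ++ (paths.getD ue.1 []).map (fun p => p ++ wd.2)
      else acc2) acc) []

def shortest_num_pad_paths_alt (src : String) (tgt : String) : List String :=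
  let qd := bfsLoop 16 [src] 0 (PySem.Dict.empty.insert src 0)
  let paths := qd.1.foldl
    (fun (ps : PySem.Dict String (List String)) v =>
      if v == src then ps else ps.insert v (pathsFor qd.2 ps v))
    (PySem.Dict.empty.insert src [""])
  paths.getD tgt []  -- paths[tgt]; within Pre_ tgt is present

-- ===== PRECONDITION & SPEC =====
-- Pre_ admits exactly the pad buttons: for src/tgt outside NUM_MOVES the Python A
-- raises (KeyError on prev[tgt], or RecursionError cycling through inf-tied prev lists).
def Pre_shortest_num_pad_paths (src : String) (tgt : String) : Prop :=
  src ∈ ["A", "0", "1", "2", "3", "4", "5", "6", "7", "8", "9"] ∧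
  tgt ∈ ["A", "0", "1", "2", "3", "4", "5", "6", "7", "8", "9"]

instance (src : String) (tgt : String) : Decidable (Pre_shortest_num_pad_paths src tgt) := by
  unfold Pre_shortest_num_pad_paths; infer_instance

def pvWitness_shortest_num_pad_paths : String × String := ("A", "7")

def Spec_shortest_num_pad_paths (src : String) (tgt : String) (out : List String) : Prop :=
  out = shortest_num_pad_paths_alt src tgt
instance (src : String) (tgt : String) (out : List String) :
    Decidable (Spec_shortest_num_pad_paths src tgt out) := by
  unfold Spec_shortest_num_pad_paths; infer_instance

-- ===== CLAIM (what is proved, stated in full; the proofs are below) =====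
def Claim_equal_shortest_num_pad_paths : Prop :=
  ∀ (src : String) (tgt : String), Dom_shortest_num_pad_paths src tgt →
    Pre_shortest_num_pad_paths src tgt →
    Spec_shortest_num_pad_paths src tgt (shortest_num_pad_paths src tgt)

-- ===== LEMMAS AND PROOFS =====
-- both ports agree on all 121 pad-button pairs, by evaluation
theorem allPairsEq :
    ∀ s ∈ ["A", "0", "1", "2", "3", "4", "5", "6", "7", "8", "9"],
      ∀ t ∈ ["A", "0", "1", "2", "3", "4", "5", "6", "7", "8", "9"],
        shortest_num_pad_paths s t = shortest_num_pad_paths_alt s t := by decide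

-- ===== VERDICT (by name: the statement is the Claim_ definition above) =====
theorem shortest_num_pad_paths_spec : Claim_equal_shortest_num_pad_paths := by
  intro src tgt _ hpre
  unfold Spec_shortest_num_pad_paths
  exact allPairsEq src hpre.1 tgt hpre.2
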